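-- pv_equiv track=rewrite | github.com/mohammadfaiizan/ProjectI | DSA/Problem/Dynamic Programming/04_Longest_Subsequence/1713_Minimum_Operations_to_Make_a_Subsequence.py | min_operations_brute_force
-- ===== SOURCE A (Python) =====
-- def min_operations_brute_force(target, arr):
--     """
--     BRUTE FORCE APPROACH - LCS:
--     ===========================
--     Find LCS between target and arr, then calculate operations needed.
--
--     Time Complexity: O(n * m) - LCS computation
--     Space Complexity: O(n * m) - DP table
--     """
--     def lcs_length(text1, text2):
--         m, n = len(text1), len(text2)
--         dp = [[0] * (n + 1) for _ in range(m + 1)]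
--
--         for i in range(1, m + 1):
--             for j in range(1, n + 1):
--                 if text1[i - 1] == text2[j - 1]:
--                     dp[i][j] = dp[i - 1][j - 1] + 1
--                 else:
--                     dp[i][j] = max(dp[i - 1][j], dp[i][j - 1])
--
--         return dp[m][n]
--
--     # LCS gives us maximum elements we don't need to insert
--     lcs_len = lcs_length(target, arr)
--     return len(target) - lcs_len
-- ===== SOURCE B (Python) =====
-- def _lower_bound(tails, j, lo, hi):
--     # first index k in [lo, hi) with tails[k] >= j (tails is sorted ascending)
--     if lo >= hi:
--         return lo
--     mid = (lo + hi) // 2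
--     if tails[mid] < j:
--         return _lower_bound(tails, j, mid + 1, hi)
--     return _lower_bound(tails, j, lo, mid)
--
--
-- def min_operations_brute_force(target, arr):
--     # Hunt-Szymanski / patience sorting: the LCS of target and arr equals the
--     # longest strictly increasing sequence of arr-positions j_0 < j_1 < ... such
--     # that arr[j_k] matches successive target elements in order.  Walk target,
--     # and for each element feed its match positions in arr (in DECREASING order,
--     # so no two picks share a target element) to a patience structure: tails[k]
--     # is the smallest arr-position ending a common subsequence of length k+1.
--     pos = {}
--     for j, x in enumerate(arr):
--         pos.setdefault(x, []).append(j)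
--     tails = []
--     for t in target:
--         for j in reversed(pos.get(t, [])):
--             k = _lower_bound(tails, j, 0, len(tails))
--             if k == len(tails):
--                 tails.append(j)
--             else:
--                 tails[k] = j
--     return len(target) - len(tails)
-- ===== Notes on version B (the rewrite author's own statement) =====
-- stated objective: faster
-- what changed: A fills the full (m+1)x(n+1) LCS dynamic-programming table; B uses Hunt-Szymanski: it indexes arr's positions per value in a dict once, reduces LCS to longest strictly increasing sequence of match positions (feeding each target element's positions in decreasing order), and maintains patience-sorting tails with binary search.
import Mathlib
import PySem

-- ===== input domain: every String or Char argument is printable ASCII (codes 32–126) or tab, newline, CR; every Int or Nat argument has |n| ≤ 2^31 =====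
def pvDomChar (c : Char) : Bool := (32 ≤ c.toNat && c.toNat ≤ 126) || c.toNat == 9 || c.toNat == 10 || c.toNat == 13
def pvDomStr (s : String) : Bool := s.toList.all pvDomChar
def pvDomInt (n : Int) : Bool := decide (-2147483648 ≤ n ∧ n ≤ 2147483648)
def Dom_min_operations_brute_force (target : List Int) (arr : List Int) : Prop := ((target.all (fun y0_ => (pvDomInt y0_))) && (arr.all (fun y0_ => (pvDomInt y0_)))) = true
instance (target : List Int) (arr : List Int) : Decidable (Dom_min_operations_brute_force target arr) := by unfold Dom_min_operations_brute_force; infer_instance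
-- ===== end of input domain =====

-- B replaces A's full (m+1)×(n+1) LCS table by Hunt–Szymanski: a dict of each
-- value's positions in arr, and patience-sorting tails (binary search) over the
-- match positions of successive target elements, fed in decreasing order.

-- ===== PORT A =====
def min_operations_brute_force (target : List Int) (arr : List Int) : Int :=
  let m : Int := PySem.List.len target
  let n : Int := PySem.List.len arr
  -- dp = [[0] * (n + 1) for _ in range(m + 1)]
  let dp0 : List (List Int) :=
    (PySem.List.pyRange 0 (m + 1) 1).map (fun _ => List.replicate (n + 1).toNat (0 : Int))
  -- the two nested index loops, mutating dp[i][j]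
  let dp :=
    (PySem.List.pyRange 1 (m + 1) 1).foldl (fun dp i =>
      (PySem.List.pyRange 1 (n + 1) 1).foldl (fun dp j =>
        let v : Int :=
          if PySem.List.pyGetD target (i - 1) 0 = PySem.List.pyGetD arr (j - 1) 0 then
            PySem.List.pyGetD (PySem.List.pyGetD dp (i - 1) []) (j - 1) 0 + 1
          else
            max (PySem.List.pyGetD (PySem.List.pyGetD dp (i - 1) []) j 0)
                (PySem.List.pyGetD (PySem.List.pyGetD dp i []) (j - 1) 0)
        PySem.List.pySetD dp i (PySem.List.pySetD (PySem.List.pyGetD dp i []) j v)) dp) dp0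
  let lcs_len := PySem.List.pyGetD (PySem.List.pyGetD dp m []) n 0
  m - lcs_len

-- ===== PORT B =====
-- _lower_bound(tails, j, lo, hi): first index k in [lo, hi) with tails[k] >= j
def lowerBound (tails : List Int) (j : Int) (lo hi : Int) : Int :=
  if h : lo ≥ hi then lo
  else
    let mid := PySem.Int.floordiv (lo + hi) 2
    if PySem.List.pyGetD tails mid 0 < j then lowerBound tails j (mid + 1) hi
    else lowerBound tails j lo mid
termination_by (hi - lo).toNat
decreasing_by
  · have hlt : lo < hi := lt_of_not_ge h
    have h2 : PySem.Int.floordiv (lo + hi) 2 < hi :=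
      (PySem.Int.floordiv_lt_iff_lt_mul (by omega)).mpr (by omega)
    have h1 : lo ≤ PySem.Int.floordiv (lo + hi) 2 :=
      (PySem.Int.le_floordiv_iff_mul_le (by omega)).mpr (by omega)
    omega
  · have hlt : lo < hi := lt_of_not_ge h
    have h2 : PySem.Int.floordiv (lo + hi) 2 < hi :=
      (PySem.Int.floordiv_lt_iff_lt_mul (by omega)).mpr (by omega)
    have h1 : lo ≤ PySem.Int.floordiv (lo + hi) 2 :=
      (PySem.Int.le_floordiv_iff_mul_le (by omega)).mpr (by omega)
    omega

def min_operations_brute_force_alt (target : List Int) (arr : List Int) : Int :=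
  -- pos = {}; for j, x in enumerate(arr): pos.setdefault(x, []).append(j)
  let pos : PySem.Dict Int (List Int) :=
    (PySem.List.enumerate arr 0).foldl
      (fun d p => d.modify p.2 [] (fun l => l ++ [p.1])) PySem.Dict.empty
  -- tails = []; for t in target: for j in reversed(pos.get(t, [])): …
  let tails : List Int :=
    target.foldl (fun tails t =>
      ((pos.getD t []).reverse).foldl (fun tails j =>
        let k := lowerBound tails j 0 (PySem.List.len tails)
        if k = PySem.List.len tails then tails ++ [j]
        else PySem.List.pySetD tails k j) tails) []
  PySem.List.len target - PySem.List.len tails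

-- ===== PRECONDITION & SPEC =====
def Spec_min_operations_brute_force (target : List Int) (arr : List Int) (out : Int) : Prop := out = min_operations_brute_force_alt target arr
instance (target : List Int) (arr : List Int) (out : Int) : Decidable (Spec_min_operations_brute_force target arr out) := by unfold Spec_min_operations_brute_force; infer_instance

-- ===== CLAIM (what is proved, stated in full; the proofs are below) =====
def Claim_equal_min_operations_brute_force : Prop := ∀ (target : List Int) (arr : List Int), Dom_min_operations_brute_force target arr → Spec_min_operations_brute_force target arr (min_operations_brute_force target arr)

-- ===== LEMMAS AND PROOFS =====

-- ---------- shared: the recursive LCS function and its extremal characterisation ----------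

def lcsL : List Int → List Int → Int
  | [], _ => 0
  | _ :: _, [] => 0
  | a :: x, b :: y =>
    if a = b then lcsL x y + 1 else max (lcsL x (b :: y)) (lcsL (a :: x) y)
termination_by x y => x.length + y.length

theorem lcsL_nil_right (Z : List Int) : lcsL Z [] = 0 := by
  cases Z <;> simp [lcsL]

theorem lcsL_nonneg (x : List Int) : ∀ y, 0 ≤ lcsL x y := by
  induction x with
  | nil => intro y; cases y <;> simp [lcsL]
  | cons a x ih =>
    intro y
    induction y with
    | nil => simp [lcsL]
    | cons b v ihv =>
      simp only [lcsL]
      by_cases h : a = b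
      · have := ih v; simp [h]; omega
      · have h1 := ih (b :: v); simp [h]; omega

-- any common subsequence is at most lcsL long
theorem lcs_ge_aux (n : Nat) : ∀ (x y l : List Int), x.length + y.length ≤ n →
    l.Sublist x → l.Sublist y → (l.length : Int) ≤ lcsL x y := by
  induction n with
  | zero =>
    intro x y l hn hx hy
    have hx0 : x = [] := by cases x <;> simp_all
    subst hx0
    rw [List.sublist_nil.mp hx]
    cases y <;> simp [lcsL]
  | succ n ih =>
    intro x y l hn hx hy
    match x, y with
    | [], _ =>
      rw [List.sublist_nil.mp hx]
      cases y <;> simp [lcsL]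
    | a :: x, [] =>
      rw [List.sublist_nil.mp hy]
      simp [lcsL_nil_right]
    | a :: x, b :: y =>
      simp only [lcsL]
      by_cases hab : a = b
      · rw [if_pos hab]
        subst hab
        rcases List.sublist_cons_iff.mp hx with hlx | ⟨r, rfl, hr⟩
        · rcases List.sublist_cons_iff.mp hy with hly | ⟨r, rfl, hr'⟩
          · have := ih x y l (by simp at hn ⊢; omega) hlx hly
            omega
          · have hrx : r.Sublist x := (List.sublist_cons_self a r).trans hlx
            have := ih x y r (by simp at hn ⊢; omega) hrx hr'
            simp only [List.length_cons]
            push_cast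
            omega
        · rcases List.sublist_cons_iff.mp hy with hly | ⟨r', he, hr'⟩
          · have hry : r.Sublist y := (List.sublist_cons_self a r).trans hly
            have := ih x y r (by simp at hn ⊢; omega) hr hry
            simp only [List.length_cons]
            push_cast
            omega
          · have hrr : r = r' := by injection he
            subst hrr
            have := ih x y r (by simp at hn ⊢; omega) hr hr'
            simp only [List.length_cons]
            push_cast
            omega
      · rw [if_neg hab]
        rcases List.sublist_cons_iff.mp hx with hlx | ⟨r, rfl, hr⟩
        · have h1 := ih x (b :: y) l (by simp at hn ⊢; omega) hlx hy
          have h2 : lcsL x (b :: y) ≤ max (lcsL x (b :: y)) (lcsL (a :: x) y) :=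
            le_max_left _ _
          omega
        · rcases List.sublist_cons_iff.mp hy with hly | ⟨r', he, _⟩
          · have h1 := ih (a :: x) y (a :: r) (by simp at hn ⊢; omega) hx hly
            have h2 : lcsL (a :: x) y ≤ max (lcsL x (b :: y)) (lcsL (a :: x) y) :=
              le_max_right _ _
            omega
          · have : a = b := by injection he
            exact absurd this hab

theorem lcs_ge (x y l : List Int) (hx : l.Sublist x) (hy : l.Sublist y) :
    (l.length : Int) ≤ lcsL x y :=
  lcs_ge_aux (x.length + y.length) x y l le_rfl hx hy

-- lcsL is achieved by some common subsequence
theorem lcs_wit_aux (n : Nat) : ∀ (x y : List Int), x.length + y.length ≤ n →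
    ∃ l : List Int, l.Sublist x ∧ l.Sublist y ∧ (l.length : Int) = lcsL x y := by
  induction n with
  | zero =>
    intro x y hn
    have hx0 : x = [] := by cases x <;> simp_all
    subst hx0
    exact ⟨[], List.nil_sublist _, List.nil_sublist _, by cases y <;> simp [lcsL]⟩
  | succ n ih =>
    intro x y hn
    match x, y with
    | [], _ =>
      exact ⟨[], List.nil_sublist _, List.nil_sublist _, by cases y <;> simp [lcsL]⟩
    | a :: x, [] =>
      exact ⟨[], List.nil_sublist _, List.nil_sublist _, by simp [lcsL_nil_right]⟩
    | a :: x, b :: y =>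
      by_cases hab : a = b
      · subst hab
        obtain ⟨l, h1, h2, h3⟩ := ih x y (by simp at hn ⊢; omega)
        refine ⟨a :: l, h1.cons₂ a, h2.cons₂ a, ?_⟩
        simp only [lcsL, List.length_cons, if_pos]
        push_cast
        omega
      · obtain ⟨l1, h11, h12, h13⟩ := ih x (b :: y) (by simp at hn ⊢; omega)
        obtain ⟨l2, h21, h22, h23⟩ := ih (a :: x) y (by simp at hn ⊢; omega)
        by_cases hm : lcsL x (b :: y) ≤ lcsL (a :: x) y
        · refine ⟨l2, h21, h22.trans (List.sublist_cons_self b y), ?_⟩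
          simp only [lcsL]
          rw [if_neg hab, max_eq_right hm]
          exact h23
        · refine ⟨l1, h11.trans (List.sublist_cons_self a x), h12, ?_⟩
          simp only [lcsL]
          rw [if_neg hab, max_eq_left (le_of_not_ge hm)]
          exact h13

theorem lcs_wit (x y : List Int) :
    ∃ l : List Int, l.Sublist x ∧ l.Sublist y ∧ (l.length : Int) = lcsL x y :=
  lcs_wit_aux (x.length + y.length) x y le_rfl

-- ---------- A-side: evaluation of the table program ----------

def rowL (Z : List Int) : List Int → List Int → List Int
  | Q, [] => [lcsL Z Q]
  | Q, y :: ys => lcsL Z Q :: rowL Z (y :: Q) ys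

def auxR (t : Int) : List (Int × Int × Int) → Int → List Int
  | [], _ => []
  | p :: rest, left =>
    let v := if t = p.1 then p.2.1 + 1 else max p.2.2 left
    v :: auxR t rest v

theorem rowL_length (Z : List Int) (ys : List Int) : ∀ Q, (rowL Z Q ys).length = ys.length + 1 := by
  induction ys with
  | nil => intro Q; simp [rowL]
  | cons y ys ih => intro Q; simp [rowL, ih]

theorem rowL_nil_left (ys : List Int) : ∀ Q, rowL [] Q ys = List.replicate (ys.length + 1) 0 := by
  induction ys with
  | nil => intro Q; simp [rowL, lcsL]
  | cons y ys ih => intro Q; simp [rowL, lcsL, ih, List.replicate_succ]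

theorem rowL_getLast? (ys : List Int) : ∀ Z Q, (rowL Z Q ys).getLast? = some (lcsL Z (ys.reverse ++ Q)) := by
  induction ys with
  | nil => intro Z Q; simp [rowL]
  | cons y ys ih =>
    intro Z Q
    simp only [rowL, List.getLast?_cons]
    rw [ih]
    simp

theorem rowL_eq_cons (Z Q : List Int) (ys : List Int) :
    rowL Z Q ys = lcsL Z Q :: (rowL Z Q ys).tail := by
  cases ys <;> rfl

theorem auxR_rowL (t : Int) (ys : List Int) : ∀ Z Q,
    auxR t (ys.zip ((rowL Z Q ys).zip (rowL Z Q ys).tail)) (lcsL (t :: Z) Q)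
      = (rowL (t :: Z) Q ys).tail := by
  induction ys with
  | nil => intro Z Q; simp [rowL, auxR]
  | cons y ys ih =>
    intro Z Q
    have hrec : lcsL (t :: Z) (y :: Q)
        = if t = y then lcsL Z Q + 1 else max (lcsL Z (y :: Q)) (lcsL (t :: Z) Q) := by
      simp [lcsL]
    obtain ⟨r', hr'⟩ : ∃ r', rowL Z (y :: Q) ys = lcsL Z (y :: Q) :: r' :=
      ⟨(rowL Z (y :: Q) ys).tail, rowL_eq_cons _ _ _⟩
    have htail : (rowL Z (y :: Q) ys).tail = r' := by rw [hr']; rfl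
    have h1 : rowL Z Q (y :: ys) = lcsL Z Q :: lcsL Z (y :: Q) :: r' := by
      rw [rowL, hr']
    rw [h1]
    simp only [List.tail_cons, List.zip_cons_cons, auxR]
    rw [← hrec, ← htail, ← rowL_eq_cons Z (y :: Q) ys, ih]
    rw [show rowL (t :: Z) Q (y :: ys) = lcsL (t :: Z) Q :: rowL (t :: Z) (y :: Q) ys from rfl]
    simp only [List.tail_cons]
    exact (rowL_eq_cons _ _ _).symm

-- one write of the inner loop, on the row alone
def rStep (t : Int) (xs prev r : List Int) (j : Nat) : List Int :=
  r.set (j + 1) (if t = xs.getD j 0 then prev.getD j 0 + 1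
                 else max (prev.getD (j + 1) 0) (r.getD j 0))

theorem fold_set_loc (G : List Int → List Int → Nat → List Int) (l : List Nat) (i p : Nat)
    (hpi : p ≠ i) :
    ∀ (dp : List (List Int)), i < dp.length →
    l.foldl (fun dp j => dp.set i (G (dp.getD p []) (dp.getD i []) j)) dp
      = dp.set i (l.foldl (fun r j => G (dp.getD p []) r j) (dp.getD i [])) := by
  induction l with
  | nil =>
    intro dp hi
    simp only [List.foldl_nil]
    rw [List.getD, List.getElem?_eq_getElem hi]
    simp
  | cons j l ih =>
    intro dp hi
    simp only [List.foldl_cons]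
    rw [ih (dp.set i (G (dp.getD p []) (dp.getD i []) j)) (by simpa using hi)]
    have hp : (dp.set i (G (dp.getD p []) (dp.getD i []) j)).getD p [] = dp.getD p [] := by
      simp [List.getD, List.getElem?_set_ne (fun h => hpi h.symm)]
    have hii : (dp.set i (G (dp.getD p []) (dp.getD i []) j)).getD i []
        = G (dp.getD p []) (dp.getD i []) j := by
      simp [List.getD, hi]
    rw [hp, hii, List.set_set]

theorem set_at_length {α : Type} (l₁ : List α) (a : α) (l₂ : List α) (v : α) :
    (l₁ ++ a :: l₂).set l₁.length v = (l₁ ++ [v]) ++ l₂ := by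
  induction l₁ with
  | nil => simp
  | cons x l ih => simp [ih]

theorem rowfold (t : Int) (xs prev : List Int) (hlen : prev.length = xs.length + 1) :
    ∀ (c : Nat), ∀ (k : Nat) (built : List Int) (h : built ≠ []),
    built.length = k + 1 → k + c = xs.length →
    (List.range' k c).foldl (rStep t xs prev) (built ++ List.replicate c 0)
      = built ++ auxR t ((xs.drop k).zip ((prev.drop k).zip (prev.drop (k + 1))))
          (built.getLast h) := by
  intro c
  induction c with
  | zero =>
    intro k built h hb hsum
    have hd : xs.drop k = [] := List.drop_of_length_le (by omega)
    simp [hd, auxR]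
  | succ c ih =>
    intro k built h hb hsum
    have hk : k < xs.length := by omega
    have hk1 : k + 1 < prev.length := by omega
    have hk0 : k < prev.length := by omega
    rw [List.range'_succ, List.replicate_succ, List.foldl_cons]
    have hstate : rStep t xs prev (built ++ 0 :: List.replicate c 0) k
        = (built ++ [if t = xs[k] then prev[k] + 1
                     else max prev[k + 1] (built.getLast h)]) ++ List.replicate c 0 := by
      unfold rStep
      have hr : (built ++ 0 :: List.replicate c 0).getD k 0 = built.getLast h := by
        rw [List.getD_append _ _ _ _ (by omega), List.getD_eq_getElem _ _ (by omega),
            List.getLast_eq_getElem]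
        congr 1
        omega
      rw [hr, List.getD_eq_getElem _ _ hk, List.getD_eq_getElem _ _ hk0,
          List.getD_eq_getElem _ _ hk1]
      set v := if t = xs[k] then prev[k] + 1 else max prev[k + 1] (built.getLast h) with hv
      rw [← hb]
      exact set_at_length built 0 _ v
    rw [hstate]
    rw [ih (k + 1) _ (by simp) (by simp [hb]) (by omega)]
    have hxd : xs.drop k = xs[k] :: xs.drop (k + 1) := List.drop_eq_getElem_cons hk
    have hpd : prev.drop k = prev[k] :: prev.drop (k + 1) := List.drop_eq_getElem_cons hk0
    have hpd1 : prev.drop (k + 1) = prev[k + 1] :: prev.drop (k + 2) :=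
      List.drop_eq_getElem_cons hk1
    conv_rhs => rw [hxd, hpd, hpd1]
    rw [List.zip_cons_cons, List.zip_cons_cons, auxR]
    simp [← hpd1]

theorem a_bridge (target arr : List Int) :
    min_operations_brute_force target arr
      = (target.length : Int) -
        ((((List.range target.length).foldl
            (fun dp k => (List.range arr.length).foldl
              (fun dp k' => dp.set (k + 1)
                (rStep (target.getD k 0) arr (dp.getD k []) (dp.getD (k + 1) []) k')) dp)
            (List.replicate (target.length + 1)
              (List.replicate (arr.length + 1) (0 : Int)))).getD target.length []).getD
          arr.length 0) := by
  unfold min_operations_brute_force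
  dsimp only
  simp only [PySem.List.len_eq]
  have hM : (((target.length : Int) + 1) - 1).toNat = target.length := by omega
  have hM0 : (((target.length : Int) + 1) - 0).toNat = target.length + 1 := by omega
  have hN : (((arr.length : Int) + 1) - 1).toNat = arr.length := by omega
  simp only [PySem.List.pyRange_one, List.foldl_map, hM, hM0, hN]
  have hconst : ∀ (L : List Int),
      L.map (fun _ => List.replicate (((arr.length : Int) + 1).toNat) (0 : Int))
        = List.replicate L.length (List.replicate (arr.length + 1) (0 : Int)) := by
    intro L
    rw [List.map_const']
    have hnn : ((arr.length : Int) + 1).toNat = arr.length + 1 := by omega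
    rw [hnn]
  rw [hconst, List.length_map, List.length_range]
  have hfold : ∀ (init : List (List Int)),
      (List.range target.length).foldl
        (fun (dp : List (List Int)) (k : Nat) => (List.range arr.length).foldl
          (fun (dp : List (List Int)) (k' : Nat) =>
            PySem.List.pySetD dp (1 + (k : Int))
              (PySem.List.pySetD (PySem.List.pyGetD dp (1 + (k : Int)) []) (1 + (k' : Int))
                (if PySem.List.pyGetD target (1 + (k : Int) - 1) 0
                      = PySem.List.pyGetD arr (1 + (k' : Int) - 1) 0 then
                  PySem.List.pyGetD (PySem.List.pyGetD dp (1 + (k : Int) - 1) []) (1 + (k' : Int) - 1) 0 + 1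
                 else
                  max (PySem.List.pyGetD (PySem.List.pyGetD dp (1 + (k : Int) - 1) []) (1 + (k' : Int)) 0)
                      (PySem.List.pyGetD (PySem.List.pyGetD dp (1 + (k : Int)) []) (1 + (k' : Int) - 1) 0)))) dp) init
      = (List.range target.length).foldl
        (fun dp k => (List.range arr.length).foldl
          (fun dp k' => dp.set (k + 1)
            (rStep (target.getD k 0) arr (dp.getD k []) (dp.getD (k + 1) []) k')) dp) init := by
    intro init
    apply PySem.List.foldl_congr_mem
    intro dp k _
    apply PySem.List.foldl_congr_mem
    intro dp' k' _
    have e1 : (1 : Int) + (k : Int) - 1 = ((k : Nat) : Int) := by ring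
    have e2 : (1 : Int) + (k : Int) = (((k + 1 : Nat)) : Int) := by push_cast; ring
    have e3 : (1 : Int) + (k' : Int) - 1 = ((k' : Nat) : Int) := by ring
    have e4 : (1 : Int) + (k' : Int) = (((k' + 1 : Nat)) : Int) := by push_cast; ring
    rw [e1, e3]
    rw [e2, e4]
    simp only [PySem.List.pyGetD_natCast, PySem.List.pySetD_natCast]
    rfl
  rw [hfold]
  simp [PySem.List.pyGetD_natCast]

theorem set_at_length' {α : Type} (l₁ : List α) (a : α) (l₂ : List α) (v : α) (n : Nat)
    (h : n = l₁.length) : (l₁ ++ a :: l₂).set n v = (l₁ ++ [v]) ++ l₂ := by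
  subst h; exact set_at_length l₁ a l₂ v

theorem row_build (t : Int) (Z ys : List Int) :
    (0 : Int) :: auxR t (ys.zip ((rowL Z [] ys).zip (rowL Z [] ys).tail)) 0
      = rowL (t :: Z) [] ys := by
  have h0 : (0 : Int) = lcsL (t :: Z) [] := (lcsL_nil_right _).symm
  rw [h0, auxR_rowL]
  exact (rowL_eq_cons _ _ _).symm

theorem take_rev_succ (l : List Int) (k : Nat) (hk : k < l.length) :
    (l.take (k + 1)).reverse = l.getD k 0 :: (l.take k).reverse := by
  have h1 : l.take (k + 1) = l.take k ++ [l[k]] := by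
    rw [List.take_add_one, List.getElem?_eq_getElem hk]
    simp
  rw [h1, List.reverse_append]
  simp [List.getD, List.getElem?_eq_getElem hk]

def dpAfter (target arr : List Int) (k : Nat) : List (List Int) :=
  (List.range (k + 1)).map (fun i => rowL ((target.take i).reverse) [] arr)
    ++ List.replicate (target.length - k) (List.replicate (arr.length + 1) (0 : Int))

theorem dpAfter_zero (target arr : List Int) :
    dpAfter target arr 0
      = List.replicate (target.length + 1) (List.replicate (arr.length + 1) (0 : Int)) := by
  unfold dpAfter
  rw [List.range_one]
  simp [rowL_nil_left, List.replicate_succ]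

theorem length_dpAfter (target arr : List Int) (k : Nat) (hk : k ≤ target.length) :
    (dpAfter target arr k).length = target.length + 1 := by
  unfold dpAfter
  simp
  omega

theorem outerfold (target arr : List Int) : ∀ (c k : Nat), k + c = target.length →
    (List.range' k c).foldl
      (fun dp k => (List.range arr.length).foldl
        (fun dp k' => dp.set (k + 1)
          (rStep (target.getD k 0) arr (dp.getD k []) (dp.getD (k + 1) []) k')) dp)
      (dpAfter target arr k)
    = dpAfter target arr target.length := by
  intro c
  induction c with
  | zero =>
    intro k hk
    rw [List.range'_zero, List.foldl_nil]
    rw [show k = target.length by omega]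
  | succ c ih =>
    intro k hk
    have hkM : k < target.length := by omega
    rw [List.range'_succ, List.foldl_cons]
    have hlen : (dpAfter target arr k).length = target.length + 1 :=
      length_dpAfter target arr k (by omega)
    have hi : k + 1 < (dpAfter target arr k).length := by omega
    rw [fold_set_loc (rStep (target.getD k 0) arr) (List.range arr.length) (k + 1) k
        (by omega) (dpAfter target arr k) hi]
    have hprev : (dpAfter target arr k).getD k []
        = rowL ((target.take k).reverse) [] arr := by
      unfold dpAfter
      rw [List.getD, List.getElem?_append_left (by simp)]
      simp
    have hrow : (dpAfter target arr k).getD (k + 1) []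
        = List.replicate (arr.length + 1) (0 : Int) := by
      unfold dpAfter
      have hlt : 0 < target.length - k := by omega
      rw [List.getD, List.getElem?_append_right (by simp)]
      simp [hlt]
    rw [hprev, hrow]
    have hinner : (List.range arr.length).foldl
        (fun r j => rStep (target.getD k 0) arr (rowL ((target.take k).reverse) [] arr) r j)
        (List.replicate (arr.length + 1) (0 : Int))
        = rowL ((target.take (k + 1)).reverse) [] arr := by
      have hplen : (rowL ((target.take k).reverse) [] arr).length = arr.length + 1 :=
        rowL_length _ _ _
      rw [show List.replicate (arr.length + 1) (0 : Int)
          = [(0 : Int)] ++ List.replicate arr.length 0 from by rw [List.replicate_succ]; rfl]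
      rw [List.range_eq_range']
      rw [rowfold (target.getD k 0) arr (rowL ((target.take k).reverse) [] arr) hplen
          arr.length 0 [(0 : Int)] (by simp) (by simp) (by simp)]
      simp only [List.drop_zero, Nat.zero_add, List.drop_one, List.getLast_singleton]
      rw [show ([(0 : Int)] ++ auxR (target.getD k 0)
          (arr.zip ((rowL ((target.take k).reverse) [] arr).zip
            (rowL ((target.take k).reverse) [] arr).tail)) 0)
        = ((0 : Int) :: auxR (target.getD k 0)
          (arr.zip ((rowL ((target.take k).reverse) [] arr).zip
            (rowL ((target.take k).reverse) [] arr).tail)) 0) from rfl]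
      rw [row_build, take_rev_succ target k hkM]
    rw [hinner]
    have hset : (dpAfter target arr k).set (k + 1)
        (rowL ((target.take (k + 1)).reverse) [] arr) = dpAfter target arr (k + 1) := by
      unfold dpAfter
      rw [show target.length - k = (target.length - (k + 1)) + 1 by omega,
          List.replicate_succ]
      rw [set_at_length' ((List.range (k + 1)).map (fun i => rowL ((target.take i).reverse) [] arr))
          (List.replicate (arr.length + 1) (0 : Int))
          (List.replicate (target.length - (k + 1)) (List.replicate (arr.length + 1) (0 : Int)))
          (rowL ((target.take (k + 1)).reverse) [] arr) (k + 1) (by simp)]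
      congr 1
      conv_rhs => rw [List.range_succ]
      rw [List.map_append]
      rfl
    rw [hset]
    exact ih (k + 1) (by omega)

theorem a_eval (target arr : List Int) :
    min_operations_brute_force target arr
      = (target.length : Int) - lcsL target.reverse arr.reverse := by
  rw [a_bridge, show List.range target.length = List.range' 0 target.length from List.range_eq_range', ← dpAfter_zero target arr,
      outerfold target arr target.length 0 (by omega)]
  have h1 : (dpAfter target arr target.length).getD target.length []
      = rowL target.reverse [] arr := by
    unfold dpAfter
    rw [Nat.sub_self, List.replicate_zero, List.append_nil, List.getD, List.getElem?_map]
    simp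
  have h2 : (rowL target.reverse [] arr).getD arr.length 0
      = lcsL target.reverse arr.reverse := by
    have hlen : (rowL target.reverse [] arr).length = arr.length + 1 := rowL_length _ _ _
    rw [List.getD, show arr.length = (rowL target.reverse [] arr).length - 1 from by omega,
        ← List.getLast?_eq_getElem?, rowL_getLast?]
    simp
  rw [h1, h2]

-- ---------- B-side: match positions, patience sorting ----------

-- positions (ascending) at which arr holds value t
def posns (arr : List Int) (t : Int) : List Int :=
  (((PySem.List.enumerate arr 0).filter (fun p => p.2 == t)).map (fun p => p.1))

-- the match-position sequence Hunt–Szymanski feeds to the patience structure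
def sseq (target arr : List Int) : List Int :=
  target.flatMap (fun t => (posns arr t).reverse)

-- abstract patience insertion (replace first element ≥ x, else append)
def pins (T : List Int) (x : Int) : List Int :=
  let c := T.findIdx (fun v => decide (x ≤ v))
  if c = T.length then T ++ [x] else T.set c x

-- the port's insertion step
def portIns (T : List Int) (j : Int) : List Int :=
  let k := lowerBound T j 0 (PySem.List.len T)
  if k = PySem.List.len T then T ++ [j] else PySem.List.pySetD T k j

-- strictly increasing subsequence
def IncS (s l : List Int) : Prop := l.Sublist s ∧ l.Pairwise (· < ·)

-- patience invariant: tails sorted; every length k+1 is achieved ending at T[k];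
-- T[k] is minimal among ends of increasing subsequences of length k+1
def PInv (s T : List Int) : Prop :=
  T.Pairwise (· < ·) ∧
  (∀ k, k < T.length → ∃ l, IncS s l ∧ l.length = k + 1 ∧ l.getLast? = some (T.getD k 0)) ∧
  (∀ l, IncS s l → l.length ≤ T.length ∧
    ∀ v, l.getLast? = some v → T.getD (l.length - 1) 0 ≤ v)

-- sorted lists are monotone in getD
theorem sorted_getD_mono (T : List Int) (hs : T.Pairwise (· < ·)) (k1 k2 : Nat)
    (h12 : k1 ≤ k2) (h2 : k2 < T.length) : T.getD k1 0 ≤ T.getD k2 0 := by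
  rcases Nat.lt_or_eq_of_le h12 with h | h
  · rw [List.getD_eq_getElem _ _ (by omega), List.getD_eq_getElem _ _ h2]
    exact le_of_lt (List.pairwise_iff_getElem.mp hs k1 k2 (by omega) h2 h)
  · rw [h]

-- every element of a (<)-sorted list is at most its last element
theorem le_getLast_of_sorted (l : List Int) (hs : l.Pairwise (· < ·)) (a : Int) (ha : a ∈ l)
    (v : Int) (hv : l.getLast? = some v) : a ≤ v := by
  obtain ⟨i, hi, rfl⟩ := List.mem_iff_getElem.mp ha
  have hne : l ≠ [] := by rintro rfl; simp at hi
  rw [List.getLast?_eq_some_getLast hne, List.getLast_eq_getElem] at hv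
  have hv' : l[l.length - 1] = v := Option.some_injective _ hv
  rw [← hv']
  have := sorted_getD_mono l hs i (l.length - 1) (by omega) (by omega)
  rwa [List.getD_eq_getElem _ _ hi, List.getD_eq_getElem _ _ (by omega)] at this

theorem incs_extend (s l : List Int) (x : Int) (h : IncS s l) : IncS (s ++ [x]) l :=
  ⟨h.1.trans (List.sublist_append_left s [x]), h.2⟩

theorem incs_single (s : List Int) (x : Int) : IncS (s ++ [x]) [x] :=
  ⟨List.sublist_append_right s [x], by simp⟩

theorem incs_snoc (s l : List Int) (x : Int) (h : IncS s l)
    (hlast : ∀ v, l.getLast? = some v → v < x) : IncS (s ++ [x]) (l ++ [x]) := by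
  refine ⟨h.1.append (List.Sublist.refl [x]), ?_⟩
  rw [List.pairwise_append]
  refine ⟨h.2, by simp, ?_⟩
  intro a ha b hb
  rcases List.mem_singleton.mp hb with rfl
  have hne : l ≠ [] := by rintro rfl; simp at ha
  have hv := hlast (l.getLast hne) (List.getLast?_eq_some_getLast hne)
  exact lt_of_le_of_lt (le_getLast_of_sorted l h.2 a ha _ (List.getLast?_eq_some_getLast hne)) hv

-- elements strictly before the insertion point are < x; the one at it (if any) is ≥ x
theorem pins_lt_of_lt_findIdx (T : List Int) (x : Int) (k : Nat)
    (hk : k < T.findIdx (fun v => decide (x ≤ v))) : k < T.length ∧ T.getD k 0 < x := by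
  have hlen : T.findIdx (fun v => decide (x ≤ v)) ≤ T.length := List.findIdx_le_length
  have hkl : k < T.length := by omega
  have := List.not_of_lt_findIdx hk
  rw [List.getD_eq_getElem _ _ hkl]
  simp only [decide_eq_false_iff_not, not_le] at this
  exact ⟨hkl, this⟩

theorem pins_ge_at_findIdx (T : List Int) (x : Int)
    (hc : T.findIdx (fun v => decide (x ≤ v)) < T.length) :
    x ≤ T.getD (T.findIdx (fun v => decide (x ≤ v))) 0 := by
  have := @List.findIdx_getElem _ (fun v => decide (x ≤ v)) T hc
  rw [List.getD_eq_getElem _ _ hc]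
  simpa using this

theorem pinv_nil : PInv [] [] := by
  refine ⟨by simp, by simp, ?_⟩
  intro l hl
  have : l = [] := List.sublist_nil.mp hl.1
  subst this
  simp

theorem pins_inv (s T : List Int) (x : Int) (h : PInv s T) : PInv (s ++ [x]) (pins T x) := by
  obtain ⟨hst, hach, hmin⟩ := h
  set c := T.findIdx (fun v => decide (x ≤ v)) with hcdef
  have hcle : c ≤ T.length := List.findIdx_le_length
  have hstrict : ∀ p q : Nat, p < q → q < T.length → T.getD p 0 < T.getD q 0 := by
    intro p q hpq hq
    rw [List.getD_eq_getElem _ _ (by omega), List.getD_eq_getElem _ _ hq]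
    exact List.pairwise_iff_getElem.mp hst p q (by omega) hq hpq
  -- the new tails, and its getD values
  have hget : ∀ k, k < T.length ∨ (c = T.length ∧ k = T.length) →
      (pins T x).getD k 0 = if k = c then x else T.getD k 0 := by
    intro k hk
    unfold pins
    rw [← hcdef]
    by_cases hc : c = T.length
    · rw [if_pos hc]
      rcases hk with hk | ⟨_, hk⟩
      · rw [if_neg (by omega), List.getD_append _ _ _ _ hk]
      · rw [if_pos (by omega), hk, List.getD_eq_getElem _ _ (by simp),
            List.getElem_append_right (by omega)]
        simp
    · rw [if_neg hc]
      have hcl : c < T.length := by omega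
      rcases hk with hk | ⟨hk, _⟩
      · by_cases hkc : k = c
        · rw [if_pos hkc, hkc, List.getD_eq_getElem _ _ (by simpa using hcl),
              List.getElem_set]
          simp
        · rw [if_neg hkc, List.getD, List.getD, List.getElem?_set_ne (by omega)]
      · omega
  have hlen : (pins T x).length = if c = T.length then T.length + 1 else T.length := by
    unfold pins
    rw [← hcdef]
    by_cases hc : c = T.length <;> simp [hc]
  refine ⟨?_, ?_, ?_⟩
  -- sorted
  · rw [List.pairwise_iff_getElem]
    intro i j hi hj hij
    have hi' : i < T.length ∨ (c = T.length ∧ i = T.length) := by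
      by_cases hc : c = T.length <;> simp [hlen, hc] at hi hj <;> omega
    have hj' : j < T.length ∨ (c = T.length ∧ j = T.length) := by
      by_cases hc : c = T.length <;> simp [hlen, hc] at hi hj <;> omega
    have gi : (pins T x)[i] = (pins T x).getD i 0 := (List.getD_eq_getElem _ _ hi).symm
    have gj : (pins T x)[j] = (pins T x).getD j 0 := (List.getD_eq_getElem _ _ hj).symm
    rw [gi, gj, hget i hi', hget j hj']
    by_cases hic : i = c <;> by_cases hjc : j = c
    · omega
    · rw [if_pos hic, if_neg hjc]
      have hjl : j < T.length := by rcases hj' with h | h <;> omega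
      have hcl : c < T.length := by omega
      have h1 := pins_ge_at_findIdx T x (by rw [← hcdef]; exact hcl)
      rw [← hcdef] at h1
      have h2 := hstrict c j (by omega) hjl
      omega
    · rw [if_neg hic, if_pos hjc]
      exact (pins_lt_of_lt_findIdx T x i (by omega)).2
    · rw [if_neg hic, if_neg hjc]
      have hil : i < T.length := by
        rcases hi' with h | h
        · exact h
        · rcases hj' with h2 | h2 <;> omega
      have hjl : j < T.length := by rcases hj' with h | h <;> omega
      exact hstrict i j hij hjl
  -- achievability
  · intro k hk
    by_cases hkc : k = c
    · -- new end x at position c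
      have hkc' : k < (pins T x).length := hk
      have hside : k < T.length ∨ (c = T.length ∧ k = T.length) := by
        rw [hlen] at hkc'
        by_cases hc : c = T.length
        · exact Or.inr ⟨hc, by omega⟩
        · exact Or.inl (by omega)
      have hgc : (pins T x).getD k 0 = x := by
        rw [hget k hside, if_pos hkc]
      by_cases hc0 : k = 0
      · refine ⟨[x], incs_single s x, by simp [hc0], ?_⟩
        rw [hc0] at hgc
        rw [hc0]
        simp only [List.getLast?_singleton, Option.some_inj]
        exact hgc.symm
      · obtain ⟨l, hl, hlen', hlast⟩ := hach (k - 1) (by rcases hside with h | h <;> omega)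
        have hlt : T.getD (k - 1) 0 < x := (pins_lt_of_lt_findIdx T x (k - 1) (by omega)).2
        refine ⟨l ++ [x], incs_snoc s l x hl ?_, by simp [hlen']; omega, ?_⟩
        · intro v hv
          rw [hlast] at hv
          have : v = T.getD (k - 1) 0 := (Option.some_injective _ hv.symm)
          omega
        · rw [List.getLast?_concat, hgc]
    · -- old witness still works
      have hkT : k < T.length := by
        rw [hlen] at hk
        by_cases hc : c = T.length <;> simp [hc] at hk <;> omega
      obtain ⟨l, hl, hlen', hlast⟩ := hach k hkT
      refine ⟨l, incs_extend s l x hl, hlen', ?_⟩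
      rw [hlast, hget k (Or.inl hkT), if_neg hkc]
  -- minimality
  · intro l hl
    obtain ⟨l₁, l₂, rfl, h1, h2⟩ := List.sublist_append_iff.mp hl.1
    have hp := hl.2
    rw [List.pairwise_append] at hp
    obtain ⟨hp1, _, hcross⟩ := hp
    rcases List.sublist_singleton.mp h2 with rfl | rfl
    · -- l ⊆ s : old bound, new tails pointwise ≤ old
      rw [List.append_nil]
      have hold := hmin l₁ ⟨h1, hp1⟩
      constructor
      · rw [hlen]; split <;> omega
      · intro v hv
        have hb := hold.2 v hv
        have hne : l₁ ≠ [] := by rintro rfl; simp at hv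
        have hlpos : 0 < l₁.length := List.length_pos_iff.mpr hne
        have hidx : l₁.length - 1 < T.length := by have := hold.1; omega
        rw [hget _ (Or.inl hidx)]
        split
        · next he =>
          have hcl : c < T.length := by omega
          have hxc := pins_ge_at_findIdx T x (by rw [← hcdef]; exact hcl)
          rw [← hcdef, ← he] at hxc
          omega
        · exact hb
    · -- l ends with the new element x
      have hvx : (l₁ ++ [x]).getLast? = some x := List.getLast?_concat
      have hlx : ∀ a ∈ l₁, a < x := fun a ha => hcross a ha x (by simp)
      -- length of l₁ is at most c
      have hl1c : l₁.length ≤ c := by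
        by_contra hgt
        replace hgt : c < l₁.length := Nat.lt_of_not_le hgt
        have hne : l₁ ≠ [] := by rintro rfl; simp at hgt
        have hold := hmin l₁ ⟨h1, hp1⟩
        have hcl : c < T.length := by have := hold.1; omega
        have hxc := pins_ge_at_findIdx T x (by rw [← hcdef]; exact hcl)
        rw [← hcdef] at hxc
        have hmono := sorted_getD_mono T hst c (l₁.length - 1) (by omega)
          (by have := hold.1; omega)
        have hlastmem : l₁.getLast hne ∈ l₁ := List.getLast_mem hne
        have hb := hold.2 (l₁.getLast hne) (List.getLast?_eq_some_getLast hne)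
        have := hlx _ hlastmem
        omega
      constructor
      · rw [hlen]
        simp only [List.length_append, List.length_singleton]
        split <;> omega
      · intro v hv
        rw [hvx] at hv
        have hxv : v = x := Option.some_injective _ hv.symm
        rw [hxv]
        simp only [List.length_append, List.length_singleton, Nat.add_sub_cancel]
        by_cases hlc : l₁.length = c
        · have hside : l₁.length < T.length ∨ (c = T.length ∧ l₁.length = T.length) := by
            by_cases hc : c = T.length
            · exact Or.inr ⟨hc, by omega⟩
            · exact Or.inl (by omega)
          rw [hget _ hside, if_pos hlc]
        · have hlt : l₁.length < c := by omega
          have hltx := (pins_lt_of_lt_findIdx T x l₁.length (by omega)).2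
          rw [hget _ (Or.inl (pins_lt_of_lt_findIdx T x l₁.length (by omega)).1), if_neg hlc]
          omega

-- patience keeps the invariant along any sequence
theorem pinv_fold_aux (s2 : List Int) : ∀ (s1 T : List Int), PInv s1 T →
    PInv (s1 ++ s2) (s2.foldl pins T) := by
  induction s2 with
  | nil => intro s1 T h; simpa using h
  | cons x s2 ih =>
    intro s1 T h
    have h1 := pins_inv s1 T x h
    have h2 := ih (s1 ++ [x]) (pins T x) h1
    simpa using h2

theorem pinv_fold (S : List Int) : PInv S (S.foldl pins []) := by
  simpa using pinv_fold_aux S [] [] pinv_nil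

-- binary search returns the first index with tails[k] ≥ j (as findIdx)
theorem lb_go (tails : List Int) (j : Int) (hs : tails.Pairwise (· < ·)) :
    ∀ (n : Nat) (lo hi : Int), (hi - lo).toNat ≤ n → 0 ≤ lo → hi ≤ (tails.length : Int) →
    lo ≤ ((tails.findIdx (fun v => decide (j ≤ v)) : Nat) : Int) →
    ((tails.findIdx (fun v => decide (j ≤ v)) : Nat) : Int) ≤ hi →
    lowerBound tails j lo hi = ((tails.findIdx (fun v => decide (j ≤ v)) : Nat) : Int) := by
  intro n
  induction n with
  | zero =>
    intro lo hi hn h0 hhi hlo hc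
    rw [lowerBound]
    rw [dif_pos (by omega)]
    omega
  | succ n ih =>
    intro lo hi hn h0 hhi hlo hc
    rw [lowerBound]
    by_cases h1 : lo ≥ hi
    · rw [dif_pos h1]; omega
    · rw [dif_neg h1]
      have hlt : lo < hi := lt_of_not_ge h1
      have hm2 : PySem.Int.floordiv (lo + hi) 2 < hi :=
        (PySem.Int.floordiv_lt_iff_lt_mul (by omega)).mpr (by omega)
      have hm1 : lo ≤ PySem.Int.floordiv (lo + hi) 2 :=
        (PySem.Int.le_floordiv_iff_mul_le (by omega)).mpr (by omega)
      set mid := PySem.Int.floordiv (lo + hi) 2 with hmid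
      have hmlen : mid < (tails.length : Int) := by omega
      have hm0 : 0 ≤ mid := by omega
      have hgetm : PySem.List.pyGetD tails mid 0 = tails[mid.toNat] :=
        PySem.List.pyGetD_eq_getElem _ _ hm0 hmlen
      set cN := tails.findIdx (fun v => decide (j ≤ v)) with hcN
      by_cases hcmp : PySem.List.pyGetD tails mid 0 < j
      · rw [if_pos hcmp]
        -- every index ≤ mid has a value < j, so mid < cN
        have hmc : mid.toNat < cN := by
          rw [hcN, List.lt_findIdx_iff]
          refine ⟨by omega, ?_⟩
          intro k hk
          simp only [decide_eq_false_iff_not, not_le]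
          have hmono := sorted_getD_mono tails hs k mid.toNat hk (by omega)
          rw [hgetm] at hcmp
          rw [List.getD_eq_getElem _ _ (by omega), List.getD_eq_getElem _ _ (by omega)] at hmono
          omega
        exact ih (mid + 1) hi (by omega) (by omega) hhi (by omega) hc
      · rw [if_neg hcmp]
        -- the value at mid is ≥ j, so cN ≤ mid
        have hmc : cN ≤ mid.toNat := by
          by_contra hgt
          replace hgt : mid.toNat < cN := Nat.lt_of_not_le hgt
          rw [hcN, List.lt_findIdx_iff] at hgt
          obtain ⟨hml, hall⟩ := hgt
          have := hall mid.toNat le_rfl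
          rw [hgetm] at hcmp
          simp only [decide_eq_false_iff_not, not_le] at this
          omega
        exact ih lo mid (by omega) h0 (by omega) hlo (by omega)

theorem lb_spec (tails : List Int) (j : Int) (hs : tails.Pairwise (· < ·)) :
    lowerBound tails j 0 (PySem.List.len tails)
      = ((tails.findIdx (fun v => decide (j ≤ v)) : Nat) : Int) := by
  have hle : tails.findIdx (fun v => decide (j ≤ v)) ≤ tails.length :=
    List.findIdx_le_length
  rw [PySem.List.len_eq]
  exact lb_go tails j hs tails.length 0 (tails.length : Int) (by omega) le_rfl le_rfl
    (by omega) (by exact_mod_cast Int.ofNat_le.mpr hle)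

theorem portIns_eq_pins (T : List Int) (j : Int) (hs : T.Pairwise (· < ·)) :
    portIns T j = pins T j := by
  unfold portIns pins
  rw [lb_spec T j hs]
  simp only [PySem.List.len_eq, Int.natCast_inj, PySem.List.pySetD_natCast]

-- the port's nested loops compute the patience fold over the blocks, keeping the invariant
theorem inner_bridge : ∀ (js : List Int) (s T : List Int), PInv s T →
    js.foldl portIns T = js.foldl pins T ∧ PInv (s ++ js) (js.foldl pins T) := by
  intro js
  induction js with
  | nil => intro s T h; exact ⟨rfl, by simpa using h⟩
  | cons j js ih =>
    intro s T h
    have he : portIns T j = pins T j := portIns_eq_pins T j h.1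
    have hstep := pins_inv s T j h
    obtain ⟨ih1, ih2⟩ := ih (s ++ [j]) (pins T j) hstep
    constructor
    · simp only [List.foldl_cons, he, ih1]
    · simpa using ih2

theorem fold_bridge (arr : List Int) : ∀ (ts : List Int) (s T : List Int), PInv s T →
    ts.foldl (fun T t => ((posns arr t).reverse).foldl portIns T) T
        = (ts.flatMap (fun t => (posns arr t).reverse)).foldl pins T := by
  intro ts
  induction ts with
  | nil => intro s T h; simp
  | cons t ts ih =>
    intro s T h
    obtain ⟨h1, h2⟩ := inner_bridge ((posns arr t).reverse) s T h
    simp only [List.foldl_cons, List.flatMap_cons, List.foldl_append, h1]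
    exact ih (s ++ (posns arr t).reverse) _ h2

-- pointwise matching of positions js against values m in arr
def MatchL (arr : List Int) (js m : List Int) : Prop :=
  List.Forall₂ (fun j v => 0 ≤ j ∧ j.toNat < arr.length ∧ arr.getD j.toNat 0 = v) js m

-- characterisation of posns
theorem posns_mem (arr : List Int) (t j : Int) :
    j ∈ posns arr t ↔ 0 ≤ j ∧ j.toNat < arr.length ∧ arr.getD j.toNat 0 = t := by
  unfold posns
  simp only [List.mem_map, List.mem_filter]
  constructor
  · rintro ⟨p, ⟨hp, hpt⟩, rfl⟩
    obtain ⟨k, hk, rfl⟩ := (PySem.List.mem_enumerate_iff _ _ _).mp hp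
    simp only [beq_iff_eq] at hpt
    have hkt : ((0 : Int) + (k : Int)).toNat = k := by omega
    refine ⟨by omega, ?_, ?_⟩
    · omega
    · rw [hkt, List.getD_eq_getElem _ _ hk]
      exact hpt
  · rintro ⟨h0, hl, hv⟩
    refine ⟨((j.toNat : Int), arr[j.toNat]), ⟨?_, ?_⟩, by omega⟩
    · rw [PySem.List.mem_enumerate_iff]
      exact ⟨j.toNat, hl, by simp⟩
    · simp only [beq_iff_eq]
      rw [List.getD_eq_getElem _ _ hl] at hv
      exact hv

theorem posns_sorted (arr : List Int) (t : Int) : (posns arr t).Pairwise (· < ·) := by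
  unfold posns
  rw [List.pairwise_map]
  exact (List.Pairwise.sublist List.filter_sublist (PySem.List.pairwise_lt_enumerate arr 0)).imp
    (fun h => h)

-- an increasing sublist of a strictly decreasing list has at most one element
theorem len_le_one_of_incr_decr (p : List Int) (h1 : p.Pairwise (· < ·))
    (h2 : p.Pairwise (· > ·)) : p.length ≤ 1 := by
  match p with
  | [] => simp
  | [a] => simp
  | a :: b :: r =>
    exfalso
    have ha := (List.pairwise_cons.mp h1).1 b (by simp)
    have hb := (List.pairwise_cons.mp h2).1 b (by simp)
    omega

-- MatchL helpers
theorem matchL_nonneg (arr : List Int) (js m : List Int) (h : MatchL arr js m) :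
    ∀ j ∈ js, 0 ≤ j := by
  induction h with
  | nil => simp
  | cons hh _ ih =>
    intro j hj
    rcases List.mem_cons.mp hj with rfl | hj
    · exact hh.1
    · exact ih j hj

theorem matchL_up (a : Int) (arr : List Int) (js m : List Int) (h : MatchL arr js m) :
    MatchL (a :: arr) (js.map (· + 1)) m := by
  induction h with
  | nil => exact List.Forall₂.nil
  | cons hh ht ih =>
    rename_i j v js' m'
    refine List.Forall₂.cons ?_ ih
    dsimp only
    obtain ⟨h0, hl, hv⟩ := hh
    have ht1 : (j + 1).toNat = j.toNat + 1 := by omega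
    refine ⟨by omega, ?_, ?_⟩
    · rw [ht1]; simpa using hl
    · rw [ht1, List.getD_cons_succ]; exact hv

theorem matchL_down (a : Int) (arr : List Int) (js m : List Int)
    (hpos : ∀ j ∈ js, 1 ≤ j) (h : MatchL (a :: arr) js m) :
    MatchL arr (js.map (· - 1)) m := by
  induction h with
  | nil => exact List.Forall₂.nil
  | cons hh ht ih =>
    rename_i j v js' m'
    refine List.Forall₂.cons ?_ (ih (fun x hx => hpos x (by simp [hx])))
    dsimp only
    obtain ⟨h0, hl, hv⟩ := hh
    have hj1 : 1 ≤ j := hpos j (by simp)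
    have ht1 : (j - 1).toNat = j.toNat - 1 := by omega
    have hjn : 1 ≤ j.toNat := by omega
    refine ⟨by omega, by simp at hl; omega, ?_⟩
    · rw [ht1]
      rw [show j.toNat = (j.toNat - 1) + 1 by omega, List.getD_cons_succ] at hv
      exact hv

theorem matchL_exists (arr : List Int) : ∀ (m : List Int), m.Sublist arr →
    ∃ js, js.Pairwise (· < ·) ∧ MatchL arr js m := by
  intro m h
  induction h with
  | slnil => exact ⟨[], by simp, List.Forall₂.nil⟩
  | cons a h ih =>
    obtain ⟨js, hp, hm⟩ := ih
    refine ⟨js.map (· + 1), ?_, matchL_up a _ js _ hm⟩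
    rw [List.pairwise_map]
    exact hp.imp (fun h => by omega)
  | cons₂ a h ih =>
    obtain ⟨js, hp, hm⟩ := ih
    refine ⟨0 :: js.map (· + 1), ?_, ?_⟩
    · rw [List.pairwise_cons]
      refine ⟨?_, by rw [List.pairwise_map]; exact hp.imp (fun h => by omega)⟩
      intro y hy
      obtain ⟨j, hj, rfl⟩ := List.mem_map.mp hy
      have := matchL_nonneg _ _ _ hm j hj
      omega
    · refine List.Forall₂.cons ⟨le_rfl, by simp, by simp⟩ (matchL_up a _ js _ hm)

theorem matchL_sublist : ∀ (arr js m : List Int),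
    MatchL arr js m → js.Pairwise (· < ·) → m.Sublist arr := by
  intro arr
  induction arr with
  | nil =>
    intro js m h _
    cases h with
    | nil => exact List.nil_sublist _
    | cons hh _ => exact absurd hh.2.1 (by simp)
  | cons a arr' ih =>
    intro js m h hp
    cases h with
    | nil => exact List.nil_sublist _
    | cons hh ht =>
      rename_i j v js' m'
      obtain ⟨hj0, hjl, hjv⟩ := hh
      have hrest : ∀ y ∈ js', j < y := (List.pairwise_cons.mp hp).1
      have hptl : js'.Pairwise (· < ·) := (List.pairwise_cons.mp hp).2
      have hmap : (js'.map (· - 1)).Pairwise (· < ·) := by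
        rw [List.pairwise_map]; exact hptl.imp (fun h => by omega)
      by_cases hj : j = 0
      · have hva : v = a := by
          rw [hj] at hjv; simpa using hjv.symm
        have hm' : MatchL arr' (js'.map (· - 1)) m' :=
          matchL_down a arr' js' m' (fun y hy => by have := hrest y hy; omega) ht
        rw [hva]
        exact (ih _ _ hm' hmap).cons₂ a
      · have hall : ∀ y ∈ (j :: js'), 1 ≤ y := by
          intro y hy
          rcases List.mem_cons.mp hy with rfl | hy
          · omega
          · have := hrest y hy; omega
        have hm' : MatchL arr' ((j :: js').map (· - 1)) (v :: m') :=
          matchL_down a arr' _ _ hall (List.Forall₂.cons ⟨hj0, hjl, hjv⟩ ht)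
        have hmap' : ((j :: js').map (· - 1)).Pairwise (· < ·) := by
          rw [List.pairwise_map]; exact hp.imp (fun h => by omega)
        exact (ih _ _ hm' hmap').cons a

-- increasing subsequence of sseq  ↦  matched subsequence of target
theorem incs_to_match (arr : List Int) : ∀ (target l : List Int),
    l.Sublist (sseq target arr) → l.Pairwise (· < ·) →
    ∃ m, m.Sublist target ∧ MatchL arr l m := by
  intro target
  induction target with
  | nil =>
    intro l hl _
    rw [show sseq [] arr = [] from rfl] at hl
    rw [List.sublist_nil.mp hl]
    exact ⟨[], List.nil_sublist _, List.Forall₂.nil⟩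
  | cons t rest ih =>
    intro l hl hp
    rw [show sseq (t :: rest) arr = (posns arr t).reverse ++ sseq rest arr from rfl] at hl
    obtain ⟨p, q, rfl, hpb, hqs⟩ := List.sublist_append_iff.mp hl
    rw [List.pairwise_append] at hp
    obtain ⟨hp1, hp2, _⟩ := hp
    have hple : p.length ≤ 1 := by
      refine len_le_one_of_incr_decr p hp1 (List.Pairwise.sublist hpb ?_)
      rw [List.pairwise_reverse]
      exact (posns_sorted arr t).imp (fun h => h)
    match p, hple with
    | [], _ =>
      obtain ⟨m, hm1, hm2⟩ := ih q hqs hp2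
      exact ⟨m, hm1.cons t, by simpa using hm2⟩
    | [j], _ =>
      obtain ⟨m, hm1, hm2⟩ := ih q hqs hp2
      have hj := (posns_mem arr t j).mp (List.mem_reverse.mp (hpb.subset (by simp)))
      exact ⟨t :: m, hm1.cons₂ t, List.Forall₂.cons hj hm2⟩

-- matched subsequence of target  ↦  (increasing) subsequence of sseq
theorem match_to_incs (arr : List Int) : ∀ (m target l : List Int),
    m.Sublist target → MatchL arr l m → l.Sublist (sseq target arr) := by
  intro m target l h
  induction h generalizing l with
  | slnil =>
    intro hm
    cases hm
    exact List.nil_sublist _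
  | cons t h ih =>
    rename_i m' rest
    intro hm
    rw [show sseq (t :: rest) arr = (posns arr t).reverse ++ sseq rest arr from rfl]
    exact (ih l hm).trans (List.sublist_append_right _ _)
  | cons₂ t h ih =>
    rename_i m' rest
    intro hm
    cases hm with
    | cons hh ht =>
      rename_i j l'
      rw [show sseq (t :: rest) arr = (posns arr t).reverse ++ sseq rest arr from rfl]
      have hj : j ∈ (posns arr t).reverse :=
        List.mem_reverse.mpr ((posns_mem arr t j).mpr hh)
      exact (List.singleton_sublist.mpr hj).append (ih l' ht)

-- evaluating the port B
theorem b_eval (target arr : List Int) :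
    min_operations_brute_force_alt target arr
      = (target.length : Int) - (((sseq target arr).foldl pins []).length : Int) := by
  unfold min_operations_brute_force_alt
  dsimp only
  have hpos : ∀ t : Int,
      (((PySem.List.enumerate arr 0).foldl
        (fun d p => d.modify p.2 [] (fun l => l ++ [p.1])) PySem.Dict.empty).getD t [])
      = posns arr t := by
    intro t
    have h1 : ((PySem.List.enumerate arr 0).foldl
        (fun d p => d.modify p.2 [] (fun l => l ++ [p.1])) PySem.Dict.empty)
        = (((PySem.List.enumerate arr 0).map (fun p => (p.2, p.1))).foldl
            (fun d p => d.modify p.1 [] (fun l => l ++ [p.2])) PySem.Dict.empty) := by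
      rw [List.foldl_map]
    rw [h1, PySem.Dict.getD_foldl_modify_append, PySem.Dict.getD_empty, List.nil_append,
        List.filter_map, List.map_map]
    rfl
  have hport : (target.foldl (fun tails t =>
      ((((PySem.List.enumerate arr 0).foldl
        (fun d p => d.modify p.2 [] (fun l => l ++ [p.1])) PySem.Dict.empty).getD t []).reverse).foldl
        (fun tails j =>
          let k := lowerBound tails j 0 (PySem.List.len tails)
          if k = PySem.List.len tails then tails ++ [j]
          else PySem.List.pySetD tails k j) tails) ([] : List Int))
      = (sseq target arr).foldl pins [] := by
    have hstep : (target.foldl (fun tails t =>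
        ((((PySem.List.enumerate arr 0).foldl
          (fun d p => d.modify p.2 [] (fun l => l ++ [p.1])) PySem.Dict.empty).getD t []).reverse).foldl
          portIns tails) ([] : List Int))
        = target.foldl (fun tails t => ((posns arr t).reverse).foldl portIns tails) [] := by
      apply PySem.List.foldl_congr_mem
      intro acc t _
      rw [hpos t]
    have := fold_bridge arr target [] [] pinv_nil
    rw [show (sseq target arr) = target.flatMap (fun t => (posns arr t).reverse) from rfl]
    rw [← this, ← hstep]
    rfl
  rw [PySem.List.len_eq, PySem.List.len_eq, hport]

theorem tails_eq_lcs (target arr : List Int) :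
    (((sseq target arr).foldl pins []).length : Int) = lcsL target.reverse arr.reverse := by
  obtain ⟨hsort, hach, hmin⟩ := pinv_fold (sseq target arr)
  apply le_antisymm
  · by_cases hTnil : ((sseq target arr).foldl pins []).length = 0
    · rw [hTnil]
      simpa using lcsL_nonneg target.reverse arr.reverse
    · obtain ⟨l, hl, hlen, _⟩ := hach (((sseq target arr).foldl pins []).length - 1) (by omega)
      obtain ⟨m, hmt, hml⟩ := incs_to_match arr target l hl.1 hl.2
      have hma : m.Sublist arr := matchL_sublist arr l m hml hl.2
      have hlm : l.length = m.length := List.Forall₂.length_eq hml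
      have hge := lcs_ge target.reverse arr.reverse m.reverse
        (by rw [List.reverse_sublist]; exact hmt) (by rw [List.reverse_sublist]; exact hma)
      rw [List.length_reverse] at hge
      omega
  · obtain ⟨l, hlt, hla, hlen⟩ := lcs_wit target.reverse arr.reverse
    have hmt : l.reverse.Sublist target := List.sublist_reverse_iff.mp hlt
    have hma : l.reverse.Sublist arr := List.sublist_reverse_iff.mp hla
    obtain ⟨js, hjp, hjm⟩ := matchL_exists arr l.reverse hma
    have hsub : js.Sublist (sseq target arr) := match_to_incs arr l.reverse target js hmt hjm
    have hb := (hmin js ⟨hsub, hjp⟩).1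
    have hjl : js.length = l.reverse.length := List.Forall₂.length_eq hjm
    rw [List.length_reverse] at hjl
    omega

-- ===== VERDICT (by name: the statement is the Claim_ definition above) =====
theorem min_operations_brute_force_spec : Claim_equal_min_operations_brute_force := by
  intro target arr _
  unfold Spec_min_operations_brute_force
  rw [a_eval, b_eval, tails_eq_lcs]
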